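-- pv_equiv track=rewrite | github.com/dbabbitt/share | sequence_analysis.py | replace_consecutive_elements
-- ===== SOURCE A (Python) =====
-- def replace_consecutive_elements(actions_list, element):
--     """
--     Replace consecutive elements in a list with a count of how many
--     there are in a row.
--
--     This function iterates through a list (`actions_list`) and
--     replaces consecutive occurrences of a specified element
--     (`element`) with a string representation indicating the element
--     and its count. For example, if the list contains ['a', 'a', 'b',
--     'a', 'a'], the function would return ['a x2', 'b', 'a x2'].
--
--     Parameters:
--         actions_list (list):
--             A list of elements.
--         element (any):
--             The element to replace consecutive occurrences of.
--
--     Returns: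
--         list
--             A new list with consecutive elements replaced by count strings
--             (e.g., 'element xN').
--     """
--
--     # Initialize an empty result list to store the modified elements
--     result = []
--
--     # Initialize a count to keep track of consecutive occurrences
--     count = 0
--
--     # Loop through each element in the input list
--     for i in range(len(actions_list)):
--
--         # If the current element is the target element, increment count
--         if actions_list[i] == element:
--
--             # Increment the count if it's the target element
--             count += 1
--
--         # If a new element is encountered (not the target element)
--         else:
--
--             # Check if there were consecutive elements before
--             if count > 0:
--
--                 # Append representation of previous element and its count
--                 result.append(f'{element} x{str(count)}')
--
--             # Add the current element to the result list
--             result.append(actions_list[i])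
--
--             # Reset the count for the new element
--             count = 0
--
--     # Handle the last element if there was a sequence at the end
--     if count > 0:
--
--         # Append the last counted element with its count to the result
--         result.append(f'{element} x{str(count)}')
--
--     # Return the modified list with counts replacing consecutive elements
--     return result
-- ===== SOURCE B (Python) =====
-- from itertools import groupby
--
-- def replace_consecutive_elements(actions_list, element):
--     result = []
--     for key, group in groupby(actions_list):
--         if key == element:
--             result.append(f'{element} x{len(list(group))}')
--         else:
--             result.extend(group)
--     return result
-- ===== Notes on version B (the rewrite author's own statement) =====
-- stated objective: idiomatic
-- what changed: Replaces the manual running counter with trailing-flush special case by itertools.groupby run construction: each maximal run equal to the target becomes one count string, other runs are extended verbatim.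
import Mathlib
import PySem

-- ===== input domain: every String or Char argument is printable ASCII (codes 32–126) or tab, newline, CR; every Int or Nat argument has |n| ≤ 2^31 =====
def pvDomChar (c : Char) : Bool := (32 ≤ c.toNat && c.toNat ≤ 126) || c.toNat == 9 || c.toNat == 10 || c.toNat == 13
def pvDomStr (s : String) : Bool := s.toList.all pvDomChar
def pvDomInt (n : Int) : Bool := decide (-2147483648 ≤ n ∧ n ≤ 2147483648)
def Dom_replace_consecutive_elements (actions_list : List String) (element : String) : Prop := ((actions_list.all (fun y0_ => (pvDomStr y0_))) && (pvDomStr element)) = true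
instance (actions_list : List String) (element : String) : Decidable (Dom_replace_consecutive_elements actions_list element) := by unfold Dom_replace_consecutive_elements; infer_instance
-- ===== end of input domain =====

-- B replaces A's manual running counter + trailing flush by explicit maximal-run construction (groupby); purely idiomatic, same cost.
-- ===== PORT A =====
-- loop over indices with (result, count) state; count is the Python int counter
def pvALoop (actions_list : List String) (element : String) : List String → Int → List String
  | result, count =>
    match actions_list with
    | [] => if count > 0 then result ++ [element ++ " x" ++ PySem.Int.toStr count] else result
    | x :: xs =>
      if x == element then pvALoop xs element result (count + 1)
      else pvALoop xs element
        ((if count > 0 then result ++ [element ++ " x" ++ PySem.Int.toStr count] else result) ++ [x]) 0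

def replace_consecutive_elements (actions_list : List String) (element : String) : List String :=
  pvALoop actions_list element [] 0

-- ===== PORT B =====
-- groupby(actions_list): peel off the maximal run equal to the head, then recurse on the rest
def replace_consecutive_elements_alt (actions_list : List String) (element : String) : List String :=
  match actions_list with
  | [] => []
  | x :: xs =>
    let run := xs.takeWhile (· == x)
    let rest := xs.dropWhile (· == x)
    if x == element then
      (element ++ " x" ++ PySem.Int.toStr (1 + run.length)) ::
        replace_consecutive_elements_alt rest element
    else
      (x :: run) ++ replace_consecutive_elements_alt rest element
termination_by actions_list.length
decreasing_by
  all_goals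
    simp only [List.length_cons]
    exact Nat.lt_succ_of_le (List.length_dropWhile_le _ _)

-- ===== PRECONDITION & SPEC =====
def Spec_replace_consecutive_elements (actions_list : List String) (element : String) (out : List String) : Prop := out = replace_consecutive_elements_alt actions_list element
instance (actions_list : List String) (element : String) (out : List String) : Decidable (Spec_replace_consecutive_elements actions_list element out) := by unfold Spec_replace_consecutive_elements; infer_instance

-- ===== CLAIM (what is proved, stated in full; the proofs are below) =====
def Claim_equal_replace_consecutive_elements : Prop := ∀ (actions_list : List String) (element : String), Dom_replace_consecutive_elements actions_list element → Spec_replace_consecutive_elements actions_list element (replace_consecutive_elements actions_list element)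

-- ===== LEMMAS AND PROOFS =====

-- accumulator lemma: pvALoop only appends to result
theorem pvALoop_acc (l : List String) (e : String) (res : List String) (c : Int) :
    pvALoop l e res c = res ++ pvALoop l e [] c := by
  induction l generalizing res c with
  | nil => simp only [pvALoop]; split_ifs <;> simp
  | cons x xs ih =>
    simp only [pvALoop]
    split_ifs with h h2
    · rw [ih]
    · rw [ih]; conv_rhs => rw [ih]
      simp
    · rw [ih]; conv_rhs => rw [ih]
      simp

-- a run of non-target elements passes through unchanged
theorem pvALoop_skip (pre rest : List String) (e : String)
    (h : ∀ y ∈ pre, (y == e) = false) :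
    pvALoop (pre ++ rest) e [] 0 = pre ++ pvALoop rest e [] 0 := by
  induction pre with
  | nil => simp
  | cons x xs ih =>
    have hx : (x == e) = false := h x (List.mem_cons_self)
    simp only [List.cons_append, pvALoop, hx, Bool.false_eq_true, if_false]
    norm_num
    rw [pvALoop_acc]
    rw [ih (fun y hy => h y (List.mem_cons_of_mem _ hy))]
    simp

-- a run of target elements just increments the count
theorem pvALoop_count (pre rest : List String) (e : String) (c : Int)
    (h : ∀ y ∈ pre, (y == e) = true) :
    pvALoop (pre ++ rest) e [] c = pvALoop rest e [] (c + pre.length) := by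
  induction pre generalizing c with
  | nil => simp
  | cons x xs ih =>
    have hx : (x == e) = true := h x (List.mem_cons_self)
    simp only [List.cons_append, pvALoop, hx, if_true]
    rw [ih (c + 1) (fun y hy => h y (List.mem_cons_of_mem _ hy))]
    congr 1
    simp only [List.length_cons]
    push_cast
    ring

-- flushing a positive count before a non-target head (or the end)
theorem pvALoop_flush (rest : List String) (e : String) (c : Int) (hc : c > 0)
    (h : ∀ y ∈ rest.head?, (y == e) = false) :
    pvALoop rest e [] c = (e ++ " x" ++ PySem.Int.toStr c) :: pvALoop rest e [] 0 := by
  cases rest with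
  | nil => simp [pvALoop, hc]
  | cons y ys =>
    have hy : (y == e) = false := h y (by simp)
    simp only [pvALoop, hy, Bool.false_eq_true, if_false, if_pos hc]
    norm_num
    rw [pvALoop_acc, pvALoop_acc ys e [y]]
    simp

theorem pvDropWhile_head (p : String → Bool) (l : List String) :
    ∀ y ∈ (l.dropWhile p).head?, p y = false := by
  induction l with
  | nil => simp
  | cons x xs ih =>
    by_cases hx : p x
    · simpa [List.dropWhile_cons, hx] using ih
    · simp [hx]

theorem pvMain (n : Nat) : ∀ (l : List String), l.length ≤ n → ∀ (e : String),
    pvALoop l e [] 0 = replace_consecutive_elements_alt l e := by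
  induction n with
  | zero =>
    intro l hl e
    have : l = [] := List.eq_nil_of_length_eq_zero (Nat.le_zero.mp hl)
    subst this
    simp [pvALoop, replace_consecutive_elements_alt]
  | succ n ih =>
    intro l hl e
    cases l with
    | nil => simp [pvALoop, replace_consecutive_elements_alt]
    | cons x xs =>
      have hsplit : xs.takeWhile (· == x) ++ xs.dropWhile (· == x) = xs :=
        List.takeWhile_append_dropWhile
      have hrest_le : (xs.dropWhile (· == x)).length ≤ n := by
        have := List.length_dropWhile_le (· == x) xs
        simp only [List.length_cons] at hl
        omega
      by_cases hx : (x == e) = true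
      · have hxe : x = e := by simpa using hx
        have hrun : ∀ y ∈ xs.takeWhile (· == x), (y == e) = true := by
          intro y hy
          have hyx : (y == x) = true := List.mem_takeWhile_imp (p := (· == x)) hy
          rw [← hxe]; exact hyx
        have hhead : ∀ y ∈ (xs.dropWhile (· == x)).head?, (y == e) = false := by
          intro y hy
          have := pvDropWhile_head (· == x) xs y hy
          rw [← hxe]; exact this
        have h1 : pvALoop (x :: xs) e [] 0 = pvALoop xs e [] 1 := by
          simp [pvALoop, hx]
        have h2 : pvALoop xs e [] 1 =
            pvALoop (xs.dropWhile (· == x)) e [] (1 + (xs.takeWhile (· == x)).length) := by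
          conv_lhs => rw [← hsplit]
          rw [pvALoop_count _ _ _ _ hrun]
        rw [h1, h2, pvALoop_flush _ _ _ (by positivity) hhead, ih _ hrest_le]
        simp [replace_consecutive_elements_alt, hx]
      · have hx' : (x == e) = false := by simpa using hx
        have hrun : ∀ y ∈ x :: xs.takeWhile (· == x), (y == e) = false := by
          intro y hy
          rcases List.mem_cons.mp hy with h | h
          · subst h; exact hx'
          · have hyx : y = x := by simpa using List.mem_takeWhile_imp (p := (· == x)) h
            subst hyx; exact hx'
        have h1 : pvALoop (x :: xs) e [] 0 =
            (x :: xs.takeWhile (· == x)) ++ pvALoop (xs.dropWhile (· == x)) e [] 0 := by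
          conv_lhs => rw [show x :: xs = (x :: xs.takeWhile (· == x)) ++ xs.dropWhile (· == x) by
            simp [hsplit]]
          exact pvALoop_skip _ _ _ hrun
        rw [h1, ih _ hrest_le]
        simp [replace_consecutive_elements_alt, hx']

-- ===== VERDICT (by name: the statement is the Claim_ definition above) =====
theorem replace_consecutive_elements_spec : Claim_equal_replace_consecutive_elements := by
  intro l e _
  unfold Spec_replace_consecutive_elements replace_consecutive_elements
  exact pvMain l.length l (le_refl _) e
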